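-- pv_equiv track=rewrite | github.com/Ffr0nt/MoE_pruning | src/dataset_profile.py | iter_text_batches
-- ===== SOURCE A (Python) =====
-- from typing import Any, Generator, cast
--
-- def iter_text_batches(
--     texts: list[str],
--     batch_size: int,
--     max_batches: int,
--     max_texts: int | None,
-- ) -> Generator[list[str], None, None]:
--     """Итерирует тексты батчами с ограничением по max_texts/max_batches."""
--     if batch_size <= 0:
--         raise ValueError("profile.batch_size must be > 0")
--     if max_batches < 0:
--         raise ValueError("profile.max_batches must be >= 0")
--     if max_texts is not None and max_texts <= 0:
--         raise ValueError("profile.max_texts must be > 0 when set")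
--
--     limited = texts if max_texts is None else texts[:max_texts]
--     batch_counter = 0
--     for start in range(0, len(limited), batch_size):
--         if max_batches > 0 and batch_counter >= max_batches:
--             break
--         yield limited[start : start + batch_size]
--         batch_counter += 1
-- ===== SOURCE B (Python) =====
-- from typing import Generator
--
-- def iter_text_batches(
--     texts: list[str],
--     batch_size: int,
--     max_batches: int,
--     max_texts: int | None,
-- ) -> Generator[list[str], None, None]:
--     """Element-by-element accumulation with flush-on-full (no slicing/range indexing)."""
--     if batch_size <= 0:
--         raise ValueError("profile.batch_size must be > 0")
--     if max_batches < 0: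
--         raise ValueError("profile.max_batches must be >= 0")
--     if max_texts is not None and max_texts <= 0:
--         raise ValueError("profile.max_texts must be > 0 when set")
--
--     current: list[str] = []
--     batch_counter = 0
--     consumed = 0
--     for t in texts:
--         if max_texts is not None and consumed >= max_texts:
--             break
--         current.append(t)
--         consumed += 1
--         if len(current) == batch_size:
--             if max_batches > 0 and batch_counter >= max_batches:
--                 return
--             yield current
--             batch_counter += 1
--             current = []
--     if current and not (max_batches > 0 and batch_counter >= max_batches):
--         yield current
-- ===== Notes on version B (the rewrite author's own statement) =====
-- stated objective: alternative
-- what changed: Replaces the slice/range(start,stop,step) indexing over a pre-truncated copy by a single element-by-element pass that maintains a consumed-text counter for the max_texts cap and a current accumulator flushed when it reaches batch_size, with a guarded flush of the trailing partial batch.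
import Mathlib
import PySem

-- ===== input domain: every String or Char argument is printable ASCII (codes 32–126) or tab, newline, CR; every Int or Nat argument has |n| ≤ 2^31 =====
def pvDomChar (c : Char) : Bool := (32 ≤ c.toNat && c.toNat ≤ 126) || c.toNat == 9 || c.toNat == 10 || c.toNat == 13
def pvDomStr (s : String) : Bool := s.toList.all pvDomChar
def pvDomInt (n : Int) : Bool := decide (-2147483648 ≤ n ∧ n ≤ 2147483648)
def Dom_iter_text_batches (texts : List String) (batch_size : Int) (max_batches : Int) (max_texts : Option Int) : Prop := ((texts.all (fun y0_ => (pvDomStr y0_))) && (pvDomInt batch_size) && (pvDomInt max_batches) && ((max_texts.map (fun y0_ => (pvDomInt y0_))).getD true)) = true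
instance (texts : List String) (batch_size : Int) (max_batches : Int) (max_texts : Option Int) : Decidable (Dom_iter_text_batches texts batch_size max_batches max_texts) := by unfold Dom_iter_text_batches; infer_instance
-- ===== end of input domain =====

-- B replaces A's slice/range indexing by one element-by-element pass with a consumed counter and
-- a flush-on-full accumulator (objective: alternative decomposition; return value of the generator
-- materialised as a list on both sides).

-- ===== PORT A =====
-- the for-loop over range(0, len(limited), batch_size) with `break`, carrying batch_counter
def pvALoop (limited : List String) (batch_size max_batches : Int) :
    List Int → Int → List (List String)
  | [], _ => []
  | start :: rest, cnt =>
    if 0 < max_batches ∧ max_batches ≤ cnt then []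
    else PySem.List.slice limited (some start) (some (start + batch_size)) ::
         pvALoop limited batch_size max_batches rest (cnt + 1)

def iter_text_batches (texts : List String) (batch_size : Int) (max_batches : Int) (max_texts : Option Int) : List (List String) :=
  let limited := match max_texts with
    | none => texts
    | some m => PySem.List.slice texts none (some m)
  pvALoop limited batch_size max_batches (PySem.List.pyRange 0 (limited.length : Int) batch_size) 0

-- ===== PORT B =====
-- the guard `max_texts is not None and consumed >= max_texts`
def pvStopB (max_texts : Option Int) (consumed : Int) : Bool :=
  match max_texts with | some m => decide (m ≤ consumed) | none => false

-- `if current and not (max_batches > 0 and batch_counter >= max_batches): yield current`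
def pvBFlush (current : List String) (max_batches cnt : Int) : List (List String) :=
  if current ≠ [] ∧ ¬(0 < max_batches ∧ max_batches ≤ cnt) then [current] else []

-- the for-loop over texts, carrying consumed, current and batch_counter
def pvBLoop (batch_size max_batches : Int) (max_texts : Option Int) :
    List String → Int → List String → Int → List (List String)
  | [], _, current, cnt => pvBFlush current max_batches cnt
  | t :: rest, consumed, current, cnt =>
    if pvStopB max_texts consumed then
      pvBFlush current max_batches cnt
    else
      let current' := current ++ [t]
      if (current'.length : Int) = batch_size then
        if 0 < max_batches ∧ max_batches ≤ cnt then []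
        else current' :: pvBLoop batch_size max_batches max_texts rest (consumed + 1) [] (cnt + 1)
      else pvBLoop batch_size max_batches max_texts rest (consumed + 1) current' cnt

def iter_text_batches_alt (texts : List String) (batch_size : Int) (max_batches : Int) (max_texts : Option Int) : List (List String) :=
  pvBLoop batch_size max_batches max_texts texts 0 [] 0

-- ===== PRECONDITION & SPEC =====
-- Pre_ excludes exactly the inputs on which A raises ValueError in its three guards.
def Pre_iter_text_batches (texts : List String) (batch_size : Int) (max_batches : Int) (max_texts : Option Int) : Prop :=
  0 < batch_size ∧ 0 ≤ max_batches ∧ (match max_texts with | some m => decide (0 < m) | none => true) = true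
instance (texts : List String) (batch_size : Int) (max_batches : Int) (max_texts : Option Int) : Decidable (Pre_iter_text_batches texts batch_size max_batches max_texts) := by unfold Pre_iter_text_batches; infer_instance

def pvWitness_iter_text_batches : List String × Int × Int × Option Int := (["a", "b", "c", "d", "e"], 2, 2, some 4)

def Spec_iter_text_batches (texts : List String) (batch_size : Int) (max_batches : Int) (max_texts : Option Int) (out : List (List String)) : Prop := out = iter_text_batches_alt texts batch_size max_batches max_texts
instance (texts : List String) (batch_size : Int) (max_batches : Int) (max_texts : Option Int) (out : List (List String)) : Decidable (Spec_iter_text_batches texts batch_size max_batches max_texts out) := by unfold Spec_iter_text_batches; infer_instance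

-- ===== CLAIM (what is proved, stated in full; the proofs are below) =====
def Claim_equal_iter_text_batches : Prop := ∀ (texts : List String) (batch_size : Int) (max_batches : Int) (max_texts : Option Int), Dom_iter_text_batches texts batch_size max_batches max_texts → Pre_iter_text_batches texts batch_size max_batches max_texts → Spec_iter_text_batches texts batch_size max_batches max_texts (iter_text_batches texts batch_size max_batches max_texts)

-- ===== LEMMAS AND PROOFS =====

-- reference value: chunks of size b+1
def pvChunks (b : Nat) : List String → List (List String)
  | [] => []
  | x :: xs => (x :: xs.take b) :: pvChunks b (xs.drop b)
termination_by l => l.length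
decreasing_by simp [List.length_drop]

-- reference cap: take (mb - cnt) batches when mb > 0
def pvCap (mb cnt : Int) (chs : List (List String)) : List (List String) :=
  if 0 < mb then chs.take (mb - cnt).toNat else chs

theorem pvChunks_nil (b : Nat) : pvChunks b [] = [] := by rw [pvChunks.eq_def]

theorem pvChunks_cons (b : Nat) (l : List String) (h : l ≠ []) :
    pvChunks b l = l.take (b + 1) :: pvChunks b (l.drop (b + 1)) := by
  cases l with
  | nil => exact absurd rfl h
  | cons x xs => rw [pvChunks.eq_def]; simp [List.take_succ_cons, List.drop_succ_cons]

theorem pyRange_pos_nil (s n bs : Int) (hbs : 0 < bs) (h : n ≤ s) :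
    PySem.List.pyRange s n bs = [] := by
  rw [PySem.List.pyRange_of_pos _ _ hbs]
  simp [show ¬ s < n by omega]

theorem pyRange_pos_cons (s n bs : Int) (hbs : 0 < bs) (h : s < n) :
    PySem.List.pyRange s n bs = s :: PySem.List.pyRange (s + bs) n bs := by
  rw [PySem.List.pyRange_of_pos _ _ hbs, PySem.List.pyRange_of_pos _ _ hbs]
  have hnn : 0 ≤ (n - (s + bs) + bs - 1) / bs := Int.ediv_nonneg (by omega) (by omega)
  have e2 : (n - s + bs - 1) / bs = (n - (s + bs) + bs - 1) / bs + 1 := by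
    rw [show n - s + bs - 1 = (n - (s + bs) + bs - 1) + 1 * bs by ring,
        Int.add_mul_ediv_right _ _ (by omega : bs ≠ 0)]
  have key : (if s + bs < n then ((n - (s + bs) + bs - 1) / bs).toNat else 0)
      = ((n - (s + bs) + bs - 1) / bs).toNat := by
    by_cases h2 : s + bs < n
    · rw [if_pos h2]
    · rw [if_neg h2]
      have h0 : (n - (s + bs) + bs - 1) / bs = 0 :=
        Int.ediv_eq_zero_of_lt (by omega) (by omega)
      omega
  rw [if_pos h, key, e2,
      show ((n - (s + bs) + bs - 1) / bs + 1).toNat = ((n - (s + bs) + bs - 1) / bs).toNat + 1 by omega,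
      List.range_succ_eq_map]
  simp only [List.map_cons, List.map_map]
  congr 1
  · push_cast; ring
  · apply List.map_congr_left
    intro k _
    simp only [Function.comp_apply, Nat.succ_eq_add_one]
    push_cast
    ring

theorem pvALoop_eq (limited : List String) (bs mb : Int) (hbs : 0 < bs) :
    ∀ (fuel : Nat) (s cnt : Int), 0 ≤ s → (limited.length : Int) - s ≤ fuel →
    pvALoop limited bs mb (PySem.List.pyRange s (limited.length : Int) bs) cnt
      = pvCap mb cnt (pvChunks (bs.toNat - 1) (limited.drop s.toNat)) := by
  intro fuel
  induction fuel with
  | zero =>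
    intro s cnt hs hf
    rw [pyRange_pos_nil _ _ _ hbs (by omega)]
    rw [List.drop_eq_nil_of_le (by omega), pvChunks_nil]
    simp [pvALoop, pvCap]
  | succ f ih =>
    intro s cnt hs hf
    by_cases h : s < (limited.length : Int)
    · rw [pyRange_pos_cons _ _ _ hbs h]
      have hd : limited.drop s.toNat ≠ [] := by
        simp only [ne_eq, List.drop_eq_nil_iff]
        omega
      rw [pvChunks_cons _ _ hd, show bs.toNat - 1 + 1 = bs.toNat by omega]
      have hslice : PySem.List.slice limited (some s) (some (s + bs))
          = (limited.drop s.toNat).take bs.toNat := by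
        rw [PySem.List.slice_toNat limited hs (by omega)]
        congr 1
        omega
      have hdd : (limited.drop s.toNat).drop bs.toNat = limited.drop (s + bs).toNat := by
        rw [List.drop_drop]
        congr 1
        omega
      rw [hdd]
      have ih' := ih (s + bs) (cnt + 1) (by omega) (by omega)
      simp only [pvALoop, pvCap] at ih' ⊢
      rw [hslice]
      by_cases hcap : 0 < mb ∧ mb ≤ cnt
      · rw [if_pos hcap, if_pos hcap.1, show (mb - cnt).toNat = 0 by omega, List.take_zero]
      · rw [if_neg hcap, ih']
        by_cases hm : 0 < mb
        · have hc : ¬ mb ≤ cnt := fun hc => hcap ⟨hm, hc⟩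
          rw [if_pos hm, if_pos hm,
              show (mb - cnt).toNat = (mb - (cnt + 1)).toNat + 1 by omega, List.take_succ_cons]
        · rw [if_neg hm, if_neg hm]
    · rw [pyRange_pos_nil _ _ _ hbs (by omega)]
      rw [List.drop_eq_nil_of_le (by omega), pvChunks_nil]
      simp [pvALoop, pvCap]

theorem pvFlush_eq (current : List String) (bs mb cnt : Int) (hbs : 0 < bs)
    (hlen : (current.length : Int) < bs) :
    pvBFlush current mb cnt = pvCap mb cnt (pvChunks (bs.toNat - 1) current) := by
  cases hcur : current with
  | nil => simp [pvBFlush, pvChunks_nil, pvCap]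
  | cons x xs =>
    rw [← hcur]
    have hne : current ≠ [] := by rw [hcur]; simp
    rw [pvChunks_cons _ _ hne, show bs.toNat - 1 + 1 = bs.toNat by omega]
    rw [List.take_of_length_le (by omega), List.drop_eq_nil_of_le (by omega), pvChunks_nil]
    simp only [pvBFlush, pvCap]
    by_cases hm : 0 < mb
    · by_cases hc : mb ≤ cnt
      · simp [hm, hc, hne, show (mb - cnt).toNat = 0 by omega]
      · rw [if_pos ⟨hne, by tauto⟩, if_pos hm]
        rw [show (mb - cnt).toNat = (mb - (cnt + 1)).toNat + 1 by omega, List.take_succ_cons]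
        simp
    · rw [if_pos ⟨hne, by tauto⟩, if_neg hm]

-- the text budget still available: what of `rest` B will still consume
def pvCut (mt : Option Int) (consumed : Int) (rest : List String) : List String :=
  match mt with
  | none => rest
  | some m => rest.take (m - consumed).toNat

theorem pvBLoop_eq (bs mb : Int) (mt : Option Int) (hbs : 0 < bs) :
    ∀ (rest : List String) (consumed : Int) (current : List String) (cnt : Int),
    (current.length : Int) < bs →
    pvBLoop bs mb mt rest consumed current cnt
      = pvCap mb cnt (pvChunks (bs.toNat - 1) (current ++ pvCut mt consumed rest)) := by
  intro rest
  induction rest with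
  | nil =>
    intro consumed current cnt hlen
    have hcut : pvCut mt consumed [] = [] := by cases mt <;> simp [pvCut]
    rw [hcut, List.append_nil]
    simp only [pvBLoop]
    exact pvFlush_eq current bs mb cnt hbs hlen
  | cons t r ih =>
    intro consumed current cnt hlen
    by_cases hstop : pvStopB mt consumed = true
    · have hcut : pvCut mt consumed (t :: r) = [] := by
        cases mt with
        | none => simp [pvStopB] at hstop
        | some m =>
          simp [pvStopB] at hstop
          simp [pvCut, show (m - consumed).toNat = 0 by omega]
      rw [hcut, List.append_nil]
      simp only [pvBLoop]
      rw [if_pos hstop]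
      exact pvFlush_eq current bs mb cnt hbs hlen
    · have hcut : pvCut mt consumed (t :: r) = t :: pvCut mt (consumed + 1) r := by
        cases mt with
        | none => simp [pvCut]
        | some m =>
          simp [pvStopB] at hstop
          simp only [pvCut]
          rw [show (m - consumed).toNat = (m - (consumed + 1)).toNat + 1 by omega, List.take_succ_cons]
      rw [hcut, show current ++ t :: pvCut mt (consumed + 1) r
            = (current ++ [t]) ++ pvCut mt (consumed + 1) r by simp]
      simp only [pvBLoop]
      rw [if_neg hstop]
      by_cases hfull : ((current ++ [t]).length : Int) = bs
      · rw [if_pos hfull]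
        have hne : (current ++ [t]) ++ pvCut mt (consumed + 1) r ≠ [] := by simp
        rw [pvChunks_cons _ _ hne, show bs.toNat - 1 + 1 = bs.toNat by omega]
        have hpl : (current ++ [t]).length = bs.toNat := by omega
        rw [List.take_left' hpl, List.drop_left' hpl]
        have ih' := ih (consumed + 1) [] (cnt + 1) (by simpa using hbs)
        simp only [List.nil_append, pvCap] at ih'
        simp only [pvCap]
        by_cases hcap : 0 < mb ∧ mb ≤ cnt
        · rw [if_pos hcap, if_pos hcap.1, show (mb - cnt).toNat = 0 by omega, List.take_zero]
        · rw [if_neg hcap, ih']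
          by_cases hm : 0 < mb
          · have hc : ¬ mb ≤ cnt := fun hc => hcap ⟨hm, hc⟩
            rw [if_pos hm, if_pos hm,
                show (mb - cnt).toNat = (mb - (cnt + 1)).toNat + 1 by omega, List.take_succ_cons]
          · rw [if_neg hm, if_neg hm]
      · rw [if_neg hfull]
        exact ih (consumed + 1) (current ++ [t]) cnt (by simp at hfull ⊢; omega)

-- ===== VERDICT (by name: the statement is the Claim_ definition above) =====
theorem iter_text_batches_spec : Claim_equal_iter_text_batches := by
  intro texts bs mb mt _hdom hpre
  obtain ⟨hbs, _hmb, hmt⟩ := hpre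
  unfold Spec_iter_text_batches iter_text_batches iter_text_batches_alt
  cases mt with
  | none =>
    simp only
    rw [pvALoop_eq texts bs mb hbs texts.length 0 0 le_rfl (by omega)]
    rw [pvBLoop_eq bs mb none hbs texts 0 [] 0 (by simpa using hbs)]
    simp [pvCut]
  | some m =>
    simp only
    have hm0 : 0 < m := by simpa using hmt
    have hsl : PySem.List.slice texts none (some m) = texts.take m.toNat :=
      PySem.List.slice_to texts (by omega)
    rw [hsl]
    rw [pvALoop_eq (texts.take m.toNat) bs mb hbs (texts.take m.toNat).length 0 0 le_rfl (by omega)]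
    rw [pvBLoop_eq bs mb (some m) hbs texts 0 [] 0 (by simpa using hbs)]
    simp [pvCut]
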